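-- pv_equiv track=rewrite | github.com/Joezhou1211/MaJiang | main.py | dfs_melds
-- ===== SOURCE A (Python) =====
-- def dfs_melds(cards, path=[]):
--     if not cards:
--         return path
--
--     unique_cards = sorted(set(cards))
--
--     # 处理刻子
--     for card in unique_cards:
--         if cards.count(card) >= 3:
--             new_cards = cards.copy()
--             new_cards.remove(card)
--             new_cards.remove(card)
--             new_cards.remove(card)
--             result = dfs_melds(new_cards, path + [(card, card, card)])
--             if result is not None:
--                 return result
--
--     # 处理顺子
--     for i in range(len(unique_cards) - 2):
--         if unique_cards[i] + 1 in unique_cards and unique_cards[i] + 2 in unique_cards: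
--             seq_start = unique_cards[i]
--             if cards.count(seq_start) > 0 and cards.count(seq_start + 1) > 0 and cards.count(seq_start + 2) > 0:
--                 new_cards = cards.copy()
--                 new_cards.remove(seq_start)
--                 new_cards.remove(seq_start + 1)
--                 new_cards.remove(seq_start + 2)
--                 result = dfs_melds(new_cards, path + [(seq_start, seq_start + 1, seq_start + 2)])
--                 if result is not None:
--                     return result
--
--     return None
-- ===== SOURCE B (Python) =====
-- def dfs_melds(cards, path=[]):
--     # Memoized DFS on the sorted remaining multiset; melds for a suffix are
--     # computed once per distinct multiset and the caller's path is prepended at the end.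
--     memo = {}
--
--     def solve(key):
--         if key in memo:
--             return memo[key]
--         if not key:
--             return []
--         counts = {}
--         for c in key:
--             counts[c] = counts.get(c, 0) + 1
--         res = None
--         for c in counts:
--             if counts[c] >= 3:
--                 rest = list(key)
--                 rest.remove(c)
--                 rest.remove(c)
--                 rest.remove(c)
--                 sub = solve(tuple(rest))
--                 if sub is not None:
--                     res = [(c, c, c)] + sub
--                     break
--         if res is None:
--             for c in counts:
--                 if c + 1 in counts and c + 2 in counts:
--                     rest = list(key)
--                     rest.remove(c)
--                     rest.remove(c + 1)
--                     rest.remove(c + 2)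
--                     sub = solve(tuple(rest))
--                     if sub is not None:
--                         res = [(c, c + 1, c + 2)] + sub
--                         break
--         memo[key] = res
--         return res
--
--     melds = solve(tuple(sorted(cards)))
--     return None if melds is None else path + melds
-- ===== Notes on version B (the rewrite author's own statement) =====
-- stated objective: alternative
-- what changed: Replaces A's backtracking (which re-solves identical remaining hands from scratch and threads the growing path through every recursive call) by a DFS memoized on the sorted remaining multiset, using a counts dict instead of repeated list.count scans and prepending the caller's path once at the end.
import Mathlib
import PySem

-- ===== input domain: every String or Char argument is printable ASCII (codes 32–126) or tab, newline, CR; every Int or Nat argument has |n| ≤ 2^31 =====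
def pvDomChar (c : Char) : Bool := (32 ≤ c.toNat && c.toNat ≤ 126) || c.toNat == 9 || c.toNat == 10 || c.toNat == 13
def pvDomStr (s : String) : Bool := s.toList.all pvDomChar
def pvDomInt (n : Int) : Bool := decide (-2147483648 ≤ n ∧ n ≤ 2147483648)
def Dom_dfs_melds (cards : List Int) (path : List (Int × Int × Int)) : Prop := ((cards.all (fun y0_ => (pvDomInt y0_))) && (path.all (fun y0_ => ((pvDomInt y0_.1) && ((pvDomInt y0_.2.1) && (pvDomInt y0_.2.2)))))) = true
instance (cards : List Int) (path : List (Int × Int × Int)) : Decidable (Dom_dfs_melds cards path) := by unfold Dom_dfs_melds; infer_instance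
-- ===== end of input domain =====

-- B restructures A's backtracking as a DFS memoized on the sorted remaining multiset, with a
-- counts dict instead of repeated list.count scans, prepending the caller's path once at the end.

-- ===== PORT A =====
-- list.remove(v); the ValueError case is unreachable at every call site below (v is present).
def pyRemove (xs : List Int) (v : Int) : List Int := (PySem.List.remove? xs v).getD xs

-- fuel-totalised literal transliteration of A; fuel = cards.length + 1 never runs out
-- (each recursive call removes three cards).
def dfsA : Nat → List Int → List (Int × Int × Int) → Option (List (Int × Int × Int))
  | 0, _, _ => none
  | fuel+1, cards, path =>
    if cards.isEmpty then some path
    else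
      let unique := PySem.List.sorted (PySem.Set.ofList cards) (fun x => x) false
      match unique.findSome? (fun card =>
          if 3 ≤ PySem.List.count cards card then
            dfsA fuel (pyRemove (pyRemove (pyRemove cards card) card) card)
              (path ++ [(card, card, card)])
          else none) with
      | some r => some r
      | none =>
        match (List.range (unique.length - 2)).findSome? (fun i =>
            let s := unique.getD i 0   -- index i < unique.length - 2 is in range
            if unique.contains (s+1) && unique.contains (s+2) then
              if 0 < PySem.List.count cards s && 0 < PySem.List.count cards (s+1)
                  && 0 < PySem.List.count cards (s+2) then
                dfsA fuel (pyRemove (pyRemove (pyRemove cards s) (s+1)) (s+2))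
                  (path ++ [(s, s+1, s+2)])
              else none
            else none) with
        | some r => some r
        | none => none

def dfs_melds (cards : List Int) (path : List (Int × Int × Int)) : Option (List (Int × Int × Int)) :=
  dfsA (cards.length + 1) cards path

-- ===== PORT B =====
-- the first loop of solve (triplets), threading the memo dict
def tripLoopB
    (recur : PySem.Dict (List Int) (Option (List (Int × Int × Int))) → List Int →
             PySem.Dict (List Int) (Option (List (Int × Int × Int))) × Option (List (Int × Int × Int)))
    (key : List Int) (counts : PySem.Dict Int Int) :
    PySem.Dict (List Int) (Option (List (Int × Int × Int))) → List Int →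
    PySem.Dict (List Int) (Option (List (Int × Int × Int))) × Option (List (Int × Int × Int))
  | m, [] => (m, none)
  | m, c :: cs =>
    if 3 ≤ counts.getD c 0 then
      match recur m (pyRemove (pyRemove (pyRemove key c) c) c) with
      | (m', some r) => (m', some ((c, c, c) :: r))
      | (m', none) => tripLoopB recur key counts m' cs
    else tripLoopB recur key counts m cs

-- the second loop of solve (sequences), threading the memo dict
def seqLoopB
    (recur : PySem.Dict (List Int) (Option (List (Int × Int × Int))) → List Int →
             PySem.Dict (List Int) (Option (List (Int × Int × Int))) × Option (List (Int × Int × Int)))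
    (key : List Int) (counts : PySem.Dict Int Int) :
    PySem.Dict (List Int) (Option (List (Int × Int × Int))) → List Int →
    PySem.Dict (List Int) (Option (List (Int × Int × Int))) × Option (List (Int × Int × Int))
  | m, [] => (m, none)
  | m, c :: cs =>
    if counts.contains (c+1) && counts.contains (c+2) then
      match recur m (pyRemove (pyRemove (pyRemove key c) (c+1)) (c+2)) with
      | (m', some r) => (m', some ((c, c+1, c+2) :: r))
      | (m', none) => seqLoopB recur key counts m' cs
    else seqLoopB recur key counts m cs

-- solve(key): memoized; fuel-totalised (fuel = cards.length + 1 never runs out)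
def solveB : Nat → PySem.Dict (List Int) (Option (List (Int × Int × Int))) → List Int →
    PySem.Dict (List Int) (Option (List (Int × Int × Int))) × Option (List (Int × Int × Int))
  | 0, m, _ => (m, none)
  | fuel+1, m, key =>
    match m.get? key with
    | some v => (m, v)
    | none =>
      if key.isEmpty then (m, some [])
      else
        let counts : PySem.Dict Int Int :=
          key.foldl (fun d c => d.insert c (d.getD c 0 + 1)) PySem.Dict.empty
        let p1 := tripLoopB (solveB fuel) key counts m counts.keys
        let p2 := match p1.2 with
          | some _ => p1
          | none => seqLoopB (solveB fuel) key counts p1.1 counts.keys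
        (p2.1.insert key p2.2, p2.2)

def dfs_melds_alt (cards : List Int) (path : List (Int × Int × Int)) : Option (List (Int × Int × Int)) :=
  match (solveB (cards.length + 1) PySem.Dict.empty (PySem.List.sorted cards (fun x => x) false)).2 with
  | none => none
  | some m => some (path ++ m)

-- ===== PRECONDITION & SPEC =====
def Spec_dfs_melds (cards : List Int) (path : List (Int × Int × Int)) (out : Option (List (Int × Int × Int))) : Prop := out = dfs_melds_alt cards path
instance (cards : List Int) (path : List (Int × Int × Int)) (out : Option (List (Int × Int × Int))) : Decidable (Spec_dfs_melds cards path out) := by unfold Spec_dfs_melds; infer_instance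

-- ===== CLAIM (what is proved, stated in full; the proofs are below) =====
def Claim_equal_dfs_melds : Prop := ∀ (cards : List Int) (path : List (Int × Int × Int)), Dom_dfs_melds cards path → Spec_dfs_melds cards path (dfs_melds cards path)

-- ===== LEMMAS AND PROOFS =====

-- the pure (memo-free, path-free) meaning of solve, on the sorted remaining hand
def G : Nat → List Int → Option (List (Int × Int × Int))
  | 0, _ => none
  | fuel+1, k =>
    if k.isEmpty then some []
    else
      let u := PySem.Set.ofList k
      match u.findSome? (fun c =>
          if 3 ≤ PySem.List.count k c then
            (G fuel (pyRemove (pyRemove (pyRemove k c) c) c)).map ((c, c, c) :: ·)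
          else none) with
      | some r => some r
      | none =>
        u.findSome? (fun c =>
          if (decide ((c+1) ∈ u) && decide ((c+2) ∈ u)) then
            (G fuel (pyRemove (pyRemove (pyRemove k c) (c+1)) (c+2))).map ((c, c+1, c+2) :: ·)
          else none)

def Gc (k : List Int) : Option (List (Int × Int × Int)) := G (k.length + 1) k

def MemoOK (m : PySem.Dict (List Int) (Option (List (Int × Int × Int)))) : Prop :=
  ∀ k v, m.get? k = some v → v = Gc k

lemma pyRemove_of_mem {xs : List Int} {v : Int} (h : v ∈ xs) : pyRemove xs v = xs.erase v := by
  simp [pyRemove, PySem.List.remove?_eq_some_erase xs v h]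

lemma trip_mems {k : List Int} {c : Int} (h : 3 ≤ List.count c k) :
    c ∈ k ∧ c ∈ k.erase c ∧ c ∈ (k.erase c).erase c := by
  refine ⟨List.count_pos_iff.mp (by omega), ?_, ?_⟩ <;>
    · apply List.count_pos_iff.mp
      simp only [List.count_erase_self]
      omega

lemma seq_mems {k : List Int} {c : Int} (h1 : c+1 ∈ k) (h2 : c+2 ∈ k) :
    c+1 ∈ k.erase c ∧ c+2 ∈ (k.erase c).erase (c+1) := by
  constructor
  · exact (List.mem_erase_of_ne (by omega)).mpr h1
  · exact (List.mem_erase_of_ne (by omega)).mpr ((List.mem_erase_of_ne (by omega)).mpr h2)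

lemma pyRemove3_eq {k : List Int} {a b c : Int} (ha : a ∈ k) (hb : b ∈ k.erase a)
    (hc : c ∈ (k.erase a).erase b) :
    pyRemove (pyRemove (pyRemove k a) b) c = ((k.erase a).erase b).erase c := by
  rw [pyRemove_of_mem ha, pyRemove_of_mem hb, pyRemove_of_mem hc]

lemma erase3_length {k : List Int} {a b c : Int} (ha : a ∈ k) (hb : b ∈ k.erase a)
    (hc : c ∈ (k.erase a).erase b) :
    (((k.erase a).erase b).erase c).length + 3 = k.length := by
  have l1 := List.length_erase_of_mem ha
  have l2 := List.length_erase_of_mem hb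
  have l3 := List.length_erase_of_mem hc
  have p1 := List.length_pos_of_mem ha
  have p2 := List.length_pos_of_mem hb
  have p3 := List.length_pos_of_mem hc
  omega

lemma findSome?_congr {α β : Type} {l : List α} {f g : α → Option β}
    (h : ∀ x ∈ l, f x = g x) : l.findSome? f = l.findSome? g := by
  induction l with
  | nil => rfl
  | cons x t ih =>
    rw [List.findSome?_cons, List.findSome?_cons, h x (List.mem_cons_self),
      ih (fun y hy => h y (List.mem_cons_of_mem _ hy))]

lemma findSome?_map_out {α β γ : Type} (l : List α) (f : α → Option β) (h : β → γ) :
    l.findSome? (fun c => Option.map h (f c)) = Option.map h (l.findSome? f) := by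
  induction l with
  | nil => rfl
  | cons x t ih =>
    rw [List.findSome?_cons, List.findSome?_cons]
    cases f x <;> simp [ih]

lemma G_fuel_congr : ∀ (f g : Nat) (k : List Int), k.length < f → k.length < g → G f k = G g k := by
  intro f
  induction f with
  | zero => omega
  | succ f ih =>
    intro g k hf hg
    match g, hg with
    | g+1, hg =>
    rw [G, G]
    by_cases hk : k.isEmpty
    · simp [hk]
    · simp only [hk]
      have hmem : ∀ c ∈ PySem.Set.ofList k, c ∈ k := fun c hc => (PySem.Set.mem_ofList k c).mp hc
      have htrip : (PySem.Set.ofList k).findSome? (fun c =>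
            if 3 ≤ PySem.List.count k c then
              (G f (pyRemove (pyRemove (pyRemove k c) c) c)).map ((c, c, c) :: ·)
            else none)
          = (PySem.Set.ofList k).findSome? (fun c =>
            if 3 ≤ PySem.List.count k c then
              (G g (pyRemove (pyRemove (pyRemove k c) c) c)).map ((c, c, c) :: ·)
            else none) := by
        apply findSome?_congr
        intro c _
        by_cases h3 : 3 ≤ PySem.List.count k c
        · simp only [h3, if_true]
          rw [PySem.List.count_eq] at h3
          obtain ⟨m1, m2, m3⟩ := trip_mems h3
          have hlen := erase3_length m1 m2 m3
          rw [pyRemove3_eq m1 m2 m3, ih g _ (by omega) (by omega)]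
        · rw [if_neg h3, if_neg h3]
      have hseq : (PySem.Set.ofList k).findSome? (fun c =>
            if (decide ((c+1) ∈ PySem.Set.ofList k) && decide ((c+2) ∈ PySem.Set.ofList k)) then
              (G f (pyRemove (pyRemove (pyRemove k c) (c+1)) (c+2))).map ((c, c+1, c+2) :: ·)
            else none)
          = (PySem.Set.ofList k).findSome? (fun c =>
            if (decide ((c+1) ∈ PySem.Set.ofList k) && decide ((c+2) ∈ PySem.Set.ofList k)) then
              (G g (pyRemove (pyRemove (pyRemove k c) (c+1)) (c+2))).map ((c, c+1, c+2) :: ·)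
            else none) := by
        apply findSome?_congr
        intro c hc
        by_cases hcond : (decide ((c+1) ∈ PySem.Set.ofList k) && decide ((c+2) ∈ PySem.Set.ofList k)) = true
        · simp only [hcond, if_true]
          rw [Bool.and_eq_true, decide_eq_true_iff, decide_eq_true_iff] at hcond
          obtain ⟨m2, m3⟩ := seq_mems (hmem _ hcond.1) (hmem _ hcond.2)
          have hlen := erase3_length (hmem _ hc) m2 m3
          rw [pyRemove3_eq (hmem _ hc) m2 m3, ih g _ (by omega) (by omega)]
        · simp only [Bool.not_eq_true] at hcond
          simp only [hcond, Bool.false_eq_true, if_false]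
      rw [htrip, hseq]

lemma G_stable {f : Nat} {k : List Int} (h : k.length < f) : G f k = Gc k :=
  G_fuel_congr f (k.length + 1) k h (by omega)

lemma tripLoopB_ok (fuel : Nat) (key : List Int) (counts : PySem.Dict Int Int)
    (IH : ∀ (k : List Int) (m : PySem.Dict (List Int) (Option (List (Int × Int × Int)))),
      k.length < fuel → MemoOK m → (solveB fuel m k).2 = Gc k ∧ MemoOK (solveB fuel m k).1) :
    ∀ (cs : List Int) (m : PySem.Dict (List Int) (Option (List (Int × Int × Int)))),
      (∀ c ∈ cs, 3 ≤ counts.getD c 0 → (pyRemove (pyRemove (pyRemove key c) c) c).length < fuel) →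
      MemoOK m →
      MemoOK (tripLoopB (solveB fuel) key counts m cs).1 ∧
      (tripLoopB (solveB fuel) key counts m cs).2 =
        cs.findSome? (fun c => if 3 ≤ counts.getD c 0 then
          (Gc (pyRemove (pyRemove (pyRemove key c) c) c)).map ((c, c, c) :: ·) else none) := by
  intro cs
  induction cs with
  | nil => intro m _ hm; exact ⟨hm, rfl⟩
  | cons c cs ih =>
    intro m hlen hm
    by_cases h3 : 3 ≤ counts.getD c 0
    · obtain ⟨hv, hm'⟩ := IH _ m (hlen c List.mem_cons_self h3) hm
      rcases hr : solveB fuel m (pyRemove (pyRemove (pyRemove key c) c) c) with ⟨m', v⟩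
      rw [hr] at hv hm'
      simp only [tripLoopB, hr, List.findSome?_cons, if_pos h3]
      cases v with
      | some r => exact ⟨by simpa using hm', by rw [← hv]; simp⟩
      | none =>
        rw [← hv]
        exact ih m' (fun x hx => hlen x (List.mem_cons_of_mem _ hx)) hm'
    · simp only [tripLoopB, List.findSome?_cons, if_neg h3]
      exact ih m (fun x hx => hlen x (List.mem_cons_of_mem _ hx)) hm

lemma seqLoopB_ok (fuel : Nat) (key : List Int) (counts : PySem.Dict Int Int)
    (IH : ∀ (k : List Int) (m : PySem.Dict (List Int) (Option (List (Int × Int × Int)))),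
      k.length < fuel → MemoOK m → (solveB fuel m k).2 = Gc k ∧ MemoOK (solveB fuel m k).1) :
    ∀ (cs : List Int) (m : PySem.Dict (List Int) (Option (List (Int × Int × Int)))),
      (∀ c ∈ cs, (counts.contains (c+1) && counts.contains (c+2)) = true →
        (pyRemove (pyRemove (pyRemove key c) (c+1)) (c+2)).length < fuel) →
      MemoOK m →
      MemoOK (seqLoopB (solveB fuel) key counts m cs).1 ∧
      (seqLoopB (solveB fuel) key counts m cs).2 =
        cs.findSome? (fun c => if (counts.contains (c+1) && counts.contains (c+2)) = true then
          (Gc (pyRemove (pyRemove (pyRemove key c) (c+1)) (c+2))).map ((c, c+1, c+2) :: ·) else none) := by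
  intro cs
  induction cs with
  | nil => intro m _ hm; exact ⟨hm, rfl⟩
  | cons c cs ih =>
    intro m hlen hm
    by_cases hcond : (counts.contains (c+1) && counts.contains (c+2)) = true
    · obtain ⟨hv, hm'⟩ := IH _ m (hlen c List.mem_cons_self hcond) hm
      rcases hr : solveB fuel m (pyRemove (pyRemove (pyRemove key c) (c+1)) (c+2)) with ⟨m', v⟩
      rw [hr] at hv hm'
      simp only [seqLoopB, hcond, if_true, hr, List.findSome?_cons]
      cases v with
      | some r => exact ⟨by simpa using hm', by rw [← hv]; simp⟩
      | none =>
        rw [← hv]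
        exact ih m' (fun x hx => hlen x (List.mem_cons_of_mem _ hx)) hm'
    · simp only [seqLoopB, Bool.not_eq_true] at hcond ⊢
      simp only [hcond, Bool.false_eq_true, if_false, List.findSome?_cons]
      exact ih m (fun x hx => hlen x (List.mem_cons_of_mem _ hx)) hm

lemma solveB_ok : ∀ (fuel : Nat) (k : List Int) (m : PySem.Dict (List Int) (Option (List (Int × Int × Int)))),
    k.length < fuel → MemoOK m → (solveB fuel m k).2 = Gc k ∧ MemoOK (solveB fuel m k).1 := by
  intro fuel
  induction fuel with
  | zero => omega
  | succ fuel ih =>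
    intro k m hk hm
    rw [solveB]
    cases hget : m.get? k with
    | some v => exact ⟨hm k v hget, hm⟩
    | none =>
      by_cases hke : k.isEmpty
      · rw [List.isEmpty_iff] at hke
        subst hke
        simp only [List.isEmpty_nil, if_true]
        exact ⟨rfl, hm⟩
      · simp only [hke]
        set counts : PySem.Dict Int Int :=
          k.foldl (fun d c => d.insert c (d.getD c 0 + 1)) PySem.Dict.empty with hcounts
        have hkeys : counts.keys = PySem.Set.ofList k := by
          rw [hcounts, PySem.Dict.keys_foldl_insert]
          simp [pysem, PySem.Set.update, PySem.Set.ofList_eq_foldl]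
        have hgetD : ∀ c, counts.getD c 0 = (List.count c k : Int) := by
          intro c
          rw [hcounts, PySem.Dict.getD_foldl_insert_add_one]
          simp [pysem]
        have hmemk : ∀ c ∈ PySem.Set.ofList k, c ∈ k := fun c hc => (PySem.Set.mem_ofList k c).mp hc
        have hcontains : ∀ c, counts.contains c = true ↔ c ∈ k := by
          intro c
          rw [PySem.Dict.contains_iff_mem_keys, hkeys, PySem.Set.mem_ofList]
        -- length bounds for the recursive calls
        have htlen : ∀ c ∈ counts.keys, 3 ≤ counts.getD c 0 →
            (pyRemove (pyRemove (pyRemove k c) c) c).length < fuel := by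
          intro c _ h3
          rw [hgetD c] at h3
          have h3' : 3 ≤ List.count c k := by omega
          obtain ⟨m1, m2, m3⟩ := trip_mems h3'
          rw [pyRemove3_eq m1 m2 m3]
          have := erase3_length m1 m2 m3
          omega
        have hslen : ∀ c ∈ counts.keys, (counts.contains (c+1) && counts.contains (c+2)) = true →
            (pyRemove (pyRemove (pyRemove k c) (c+1)) (c+2)).length < fuel := by
          intro c hc hcnd
          rw [Bool.and_eq_true, hcontains, hcontains] at hcnd
          rw [hkeys] at hc
          obtain ⟨m2, m3⟩ := seq_mems hcnd.1 hcnd.2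
          rw [pyRemove3_eq (hmemk _ hc) m2 m3]
          have := erase3_length (hmemk _ hc) m2 m3
          omega
        obtain ⟨hm1, hv1⟩ := tripLoopB_ok fuel k counts ih counts.keys m htlen hm
        rcases hp1 : tripLoopB (solveB fuel) k counts m counts.keys with ⟨m1, v1⟩
        rw [hp1] at hm1 hv1
        dsimp only at hm1 hv1
        -- the value computed by the two loops is Gc k
        have hGc : Gc k = if v1.isSome then v1 else
            (counts.keys).findSome? (fun c => if (counts.contains (c+1) && counts.contains (c+2)) = true then
              (Gc (pyRemove (pyRemove (pyRemove k c) (c+1)) (c+2))).map ((c, c+1, c+2) :: ·) else none) := by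
          have hk1 : 1 ≤ k.length := by
            cases k with
            | nil => simp at hke
            | cons a t => simp
          rw [Gc, G]
          simp only [hke]
          have htripEq : (PySem.Set.ofList k).findSome? (fun c =>
                if 3 ≤ PySem.List.count k c then
                  (G k.length (pyRemove (pyRemove (pyRemove k c) c) c)).map ((c, c, c) :: ·)
                else none) = v1 := by
            rw [hv1, hkeys]
            apply findSome?_congr
            intro c _
            have hiff : (3 ≤ PySem.List.count k c) ↔ (3 ≤ counts.getD c 0) := by
              rw [hgetD c, PySem.List.count_eq]; omega
            by_cases h3 : 3 ≤ PySem.List.count k c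
            · rw [if_pos h3, if_pos (hiff.mp h3)]
              rw [PySem.List.count_eq] at h3
              obtain ⟨m1', m2', m3'⟩ := trip_mems h3
              have := erase3_length m1' m2' m3'
              rw [pyRemove3_eq m1' m2' m3', G_stable (by omega : (((k.erase c).erase c).erase c).length < k.length)]
            · rw [if_neg h3, if_neg (fun hh => h3 (hiff.mpr hh))]
          have hseqEq : (PySem.Set.ofList k).findSome? (fun c =>
                if (decide ((c+1) ∈ PySem.Set.ofList k) && decide ((c+2) ∈ PySem.Set.ofList k)) then
                  (G k.length (pyRemove (pyRemove (pyRemove k c) (c+1)) (c+2))).map ((c, c+1, c+2) :: ·)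
                else none)
              = (counts.keys).findSome? (fun c => if (counts.contains (c+1) && counts.contains (c+2)) = true then
                  (Gc (pyRemove (pyRemove (pyRemove k c) (c+1)) (c+2))).map ((c, c+1, c+2) :: ·) else none) := by
            rw [hkeys]
            apply findSome?_congr
            intro c hc
            have hciff : (decide ((c+1) ∈ PySem.Set.ofList k) && decide ((c+2) ∈ PySem.Set.ofList k)) = true ↔
                (counts.contains (c+1) && counts.contains (c+2)) = true := by
              rw [Bool.and_eq_true, Bool.and_eq_true, decide_eq_true_iff, decide_eq_true_iff,
                hcontains, hcontains, PySem.Set.mem_ofList, PySem.Set.mem_ofList]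
            by_cases hcnd : (decide ((c+1) ∈ PySem.Set.ofList k) && decide ((c+2) ∈ PySem.Set.ofList k)) = true
            · rw [if_pos hcnd, if_pos (hciff.mp hcnd)]
              rw [Bool.and_eq_true, decide_eq_true_iff, decide_eq_true_iff] at hcnd
              obtain ⟨m2', m3'⟩ := seq_mems (hmemk _ hcnd.1) (hmemk _ hcnd.2)
              have := erase3_length (hmemk _ hc) m2' m3'
              rw [pyRemove3_eq (hmemk _ hc) m2' m3',
                G_stable (by omega : (((k.erase c).erase (c+1)).erase (c+2)).length < k.length)]
            · rw [if_neg hcnd, if_neg (fun hh => hcnd (hciff.mpr hh))]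
          rw [htripEq, hseqEq]
          cases v1 <;> simp
        simp only [Bool.false_eq_true, if_false]
        cases v1 with
        | some r =>
          refine ⟨by simp [hGc], ?_⟩
          intro k' v' hget'
          rw [PySem.Dict.get?_insert] at hget'
          by_cases hkk : k' = k
          · subst hkk
            simp at hget'
            rw [← hget', hGc]
            simp
          · rw [if_neg hkk] at hget'
            exact hm1 k' v' hget'
        | none =>
          obtain ⟨hm2, hv2⟩ := seqLoopB_ok fuel k counts ih counts.keys m1 hslen hm1
          rcases hp2 : seqLoopB (solveB fuel) k counts m1 counts.keys with ⟨m2, v2⟩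
          rw [hp2] at hm2 hv2
          dsimp only at hm2 hv2
          dsimp only
          have hval : v2 = Gc k := by rw [hGc]; simpa using hv2
          refine ⟨hval, ?_⟩
          intro k' v' hget'
          rw [PySem.Dict.get?_insert] at hget'
          by_cases hkk : k' = k
          · subst hkk
            simp at hget'
            rw [← hget', hval]
          · rw [if_neg hkk] at hget'
            exact hm2 k' v' hget'

lemma ofList_sublist (l : List Int) : List.Sublist (PySem.Set.ofList l) l := by
  induction l with
  | nil => simp [PySem.Set.ofList]
  | cons x t ih =>
    rw [PySem.Set.ofList_cons]
    exact (List.cons_sublist_cons ..).mpr (List.filter_sublist.trans ih)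

lemma pairwise_lt_ofList_sorted (cards : List Int) :
    (PySem.Set.ofList (PySem.List.sorted cards (fun x => x) false)).Pairwise (· < ·) := by
  have hle : (PySem.Set.ofList (PySem.List.sorted cards (fun x => x) false)).Pairwise (· ≤ ·) :=
    List.Pairwise.sublist (ofList_sublist _) (PySem.List.sorted_pairwise cards (fun x => x))
  have hnd : (PySem.Set.ofList (PySem.List.sorted cards (fun x => x) false)).Nodup :=
    PySem.Set.nodup_ofList _
  exact (hle.and hnd).imp (by rintro a b ⟨h1, h2⟩; exact lt_of_le_of_ne h1 h2)

lemma ofList_sorted (cards : List Int) :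
    PySem.Set.ofList (PySem.List.sorted cards (fun x => x) false)
      = PySem.List.sorted (PySem.Set.ofList cards) (fun x => x) false := by
  refine (PySem.List.sorted_eq_of_perm_of_pairwise_lt _ _ _ ?_ (pairwise_lt_ofList_sorted cards)).symm
  rw [List.perm_ext_iff_of_nodup (PySem.Set.nodup_ofList _) (PySem.Set.nodup_ofList _)]
  intro a
  rw [PySem.Set.mem_ofList, PySem.Set.mem_ofList, PySem.List.mem_sorted]

lemma sorted_erase3 (cards : List Int) (a b c : Int) :
    PySem.List.sorted (((cards.erase a).erase b).erase c) (fun x => x) false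
      = (((PySem.List.sorted cards (fun x => x) false).erase a).erase b).erase c := by
  apply PySem.List.sorted_id_eq_of_perm_of_pairwise
  · exact (((PySem.List.sorted_perm cards (fun x => x) false).erase a).erase b).erase c
  · exact List.Pairwise.sublist
      ((List.erase_sublist ..).trans ((List.erase_sublist ..).trans (List.erase_sublist ..)))
      (PySem.List.sorted_pairwise cards (fun x => x))

lemma map_range_getD (l : List Int) :
    (List.range l.length).map (fun i => l.getD i 0) = l := by
  apply List.ext_getElem (by simp)
  intro i h1 h2
  simp [List.getElem?_eq_getElem h2]

lemma findSome?_eq_range (l : List Int) (F : Int → Option (List (Int × Int × Int))) :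
    l.findSome? F = (List.range l.length).findSome? (fun i => F (l.getD i 0)) := by
  conv_lhs => rw [← map_range_getD l]
  rw [List.findSome?_map]
  rfl

lemma range_cut (n : Nat) (g : Nat → Option (List (Int × Int × Int)))
    (h : ∀ j, n - 2 ≤ j → j < n → g j = none) :
    (List.range n).findSome? g = (List.range (n - 2)).findSome? g := by
  by_cases hn : 2 ≤ n
  · conv_lhs => rw [show n = n - 2 + 1 + 1 by omega]
    rw [List.range_succ, List.range_succ, List.findSome?_append, List.findSome?_append]
    have e1 : List.findSome? g [n - 2] = none := by
      simp [h (n - 2) (by omega) (by omega)]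
    have e2 : List.findSome? g [n - 2 + 1] = none := by
      simp [h (n - 2 + 1) (by omega) (by omega)]
    rw [e1, e2]
    simp
  · rw [show n - 2 = 0 by omega]
    simp only [List.range_zero, List.findSome?_nil]
    exact List.findSome?_eq_none_iff.mpr (fun j hj => h j (by omega) (by simpa using hj))

lemma late_candidate_none {u : List Int} (hu : u.Pairwise (· < ·)) {j : Nat}
    (hj2 : u.length - 2 ≤ j) (hjn : j < u.length) :
    ¬ ((u.getD j 0 + 1) ∈ u ∧ (u.getD j 0 + 2) ∈ u) := by
  rintro ⟨h1, h2⟩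
  set c := u.getD j 0 with hc
  have hcj : c = u[j] := List.getD_eq_getElem u 0 hjn
  -- elements greater than c in u
  set S := u.filter (fun x => decide (c < x)) with hS
  have h1' : c + 1 ∈ S := List.mem_filter.mpr ⟨h1, by simp⟩
  have h2' : c + 2 ∈ S := List.mem_filter.mpr ⟨h2, by simp⟩
  have hS2 : 2 ≤ S.length := by
    have hm : c + 2 ∈ S.erase (c + 1) := (List.mem_erase_of_ne (by omega)).mpr h2'
    have := List.length_pos_of_mem hm
    rw [List.length_erase_of_mem h1'] at this
    omega
  -- but everything at positions ≤ j is ≤ c, so S lives in the ≤ 1 positions after j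
  have hsplit : S.length ≤ u.length - (j + 1) := by
    have hu' := List.pairwise_iff_getElem.mp hu
    have htake : (u.take (j + 1)).filter (fun x => decide (c < x)) = [] := by
      rw [List.filter_eq_nil_iff]
      intro x hx
      obtain ⟨i, hi, hxi⟩ := List.getElem_of_mem hx
      have hi' : i < j + 1 := by simp at hi; omega
      have hiu : i < u.length := by omega
      rw [List.getElem_take] at hxi
      simp only [decide_eq_true_eq]
      rcases Nat.lt_or_ge i j with hij | hij
      · have := hu' i j hiu hjn hij
        omega
      · have : i = j := by omega
        subst this
        omega
    calc S.length = ((u.take (j+1) ++ u.drop (j+1)).filter (fun x => decide (c < x))).length := by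
            rw [List.take_append_drop]
      _ = ((u.drop (j+1)).filter (fun x => decide (c < x))).length := by
            rw [List.filter_append, htake]; simp
      _ ≤ (u.drop (j+1)).length := List.length_filter_le _ _
      _ = u.length - (j + 1) := List.length_drop ..
  omega

lemma seq_range_to_list (u : List Int) (hupair : u.Pairwise (· < ·))
    (F : Int → Option (List (Int × Int × Int)))
    (hF : ∀ c, (u.contains (c + 1) && u.contains (c + 2)) = false → F c = none) :
    List.findSome? (fun i => F (u.getD i 0)) (List.range (u.length - 2)) = List.findSome? F u := by
  rw [findSome?_eq_range u F]
  refine (range_cut u.length _ ?_).symm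
  intro j hj1 hj2
  apply hF
  rcases Bool.eq_false_or_eq_true (u.contains (u.getD j 0 + 1) && u.contains (u.getD j 0 + 2)) with h | h
  · exfalso
    rw [Bool.and_eq_true, List.contains_iff_mem, List.contains_iff_mem] at h
    exact late_candidate_none hupair hj1 hj2 h
  · exact h

lemma dfsA_eq_G : ∀ (fuel : Nat) (cards : List Int) (path : List (Int × Int × Int)),
    cards.length < fuel →
    dfsA fuel cards path = (Gc (PySem.List.sorted cards (fun x => x) false)).map (path ++ ·) := by
  intro fuel
  induction fuel with
  | zero => omega
  | succ fuel ih =>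
    intro cards path hlen
    by_cases hc0 : cards.isEmpty
    · rw [List.isEmpty_iff] at hc0
      subst hc0
      have h1 : PySem.List.sorted ([] : List Int) (fun x => x) false = [] :=
        (PySem.List.sorted_eq_nil_iff ..).mpr rfl
      have h2 : Gc ([] : List Int) = some [] := rfl
      rw [dfsA, h1, h2]
      simp
    · have hne : cards ≠ [] := fun h => hc0 (by rw [h]; rfl)
      set s : List Int := PySem.List.sorted cards (fun x => x) false with hs
      set u : List Int := PySem.List.sorted (PySem.Set.ofList cards) (fun x => x) false with hu
      have hsperm : s.Perm cards := PySem.List.sorted_perm cards (fun x => x) false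
      have hslen : s.length = cards.length := PySem.List.length_sorted cards (fun x => x) false
      have hsne : ¬ (s.isEmpty = true) := by
        rw [List.isEmpty_iff]
        intro h
        exact hne ((PySem.List.sorted_eq_nil_iff ..).mp h)
      have hofl : PySem.Set.ofList s = u := ofList_sorted cards
      have hupair : u.Pairwise (· < ·) := PySem.List.sorted_ofList_pairwise_lt cards
      have hmemu : ∀ c ∈ u, c ∈ cards := by
        intro c hc
        rw [hu, PySem.List.mem_sorted, PySem.Set.mem_ofList] at hc
        exact hc
      rw [dfsA, if_neg hc0]
      rw [show Gc s = G (s.length + 1) s from rfl, G, if_neg hsne]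
      dsimp only
      rw [hofl]
      simp only [← hu]
      -- the triplet loops agree (up to prepending path)
      have htrip : List.findSome? (fun card =>
            if 3 ≤ PySem.List.count cards card then
              dfsA fuel (pyRemove (pyRemove (pyRemove cards card) card) card)
                (path ++ [(card, card, card)])
            else none) u
          = Option.map (fun x => path ++ x) (List.findSome? (fun c =>
              if 3 ≤ PySem.List.count s c then
                Option.map (fun x => (c, c, c) :: x) (G s.length (pyRemove (pyRemove (pyRemove s c) c) c))
              else none) u) := by
        rw [← findSome?_map_out]
        apply findSome?_congr
        intro c _
        have hcc : List.count c s = List.count c cards := hsperm.count_eq c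
        by_cases h3 : 3 ≤ PySem.List.count cards c
        · have h3s : 3 ≤ PySem.List.count s c := by
            rw [PySem.List.count_eq, hcc, ← PySem.List.count_eq]; exact h3
          rw [if_pos h3, if_pos h3s]
          have h3' : 3 ≤ List.count c cards := by rwa [PySem.List.count_eq] at h3
          have h3s' : 3 ≤ List.count c s := by rwa [PySem.List.count_eq] at h3s
          obtain ⟨m1, m2, m3⟩ := trip_mems h3'
          obtain ⟨n1, n2, n3⟩ := trip_mems h3s'
          have hL := erase3_length m1 m2 m3
          have hLs := erase3_length n1 n2 n3
          rw [pyRemove3_eq m1 m2 m3, pyRemove3_eq n1 n2 n3]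
          rw [ih _ (path ++ [(c, c, c)]) (by omega)]
          rw [sorted_erase3 cards c c c, ← hs]
          rw [G_stable (show (((s.erase c).erase c).erase c).length < s.length by omega)]
          cases Gc (((s.erase c).erase c).erase c) <;> simp
        · have h3s : ¬ 3 ≤ PySem.List.count s c := by
            rw [PySem.List.count_eq, hcc, ← PySem.List.count_eq]; exact h3
          rw [if_neg h3, if_neg h3s]
          simp
      -- the sequence loops agree (A scans indices up to len-2; late candidates are dead)
      have hstep : List.findSome? (fun i =>
            if (u.contains (u.getD i 0 + 1) && u.contains (u.getD i 0 + 2)) = true then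
              if (decide (0 < PySem.List.count cards (u.getD i 0)) &&
                  decide (0 < PySem.List.count cards (u.getD i 0 + 1)) &&
                  decide (0 < PySem.List.count cards (u.getD i 0 + 2))) = true then
                dfsA fuel
                  (pyRemove (pyRemove (pyRemove cards (u.getD i 0)) (u.getD i 0 + 1)) (u.getD i 0 + 2))
                  (path ++ [(u.getD i 0, u.getD i 0 + 1, u.getD i 0 + 2)])
              else none
            else none) (List.range (u.length - 2))
          = List.findSome? (fun c =>
            if (u.contains (c + 1) && u.contains (c + 2)) = true then
              if (decide (0 < PySem.List.count cards c) &&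
                  decide (0 < PySem.List.count cards (c + 1)) &&
                  decide (0 < PySem.List.count cards (c + 2))) = true then
                dfsA fuel (pyRemove (pyRemove (pyRemove cards c) (c + 1)) (c + 2))
                  (path ++ [(c, c + 1, c + 2)])
              else none
            else none) u := by
        exact seq_range_to_list u hupair (fun c =>
            if (u.contains (c + 1) && u.contains (c + 2)) = true then
              if (decide (0 < PySem.List.count cards c) &&
                  decide (0 < PySem.List.count cards (c + 1)) &&
                  decide (0 < PySem.List.count cards (c + 2))) = true then
                dfsA fuel (pyRemove (pyRemove (pyRemove cards c) (c + 1)) (c + 2))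
                  (path ++ [(c, c + 1, c + 2)])
              else none
            else none)
          (fun c hc => by simp only [hc, Bool.false_eq_true, if_false])
      have hseq : List.findSome? (fun c =>
            if (u.contains (c + 1) && u.contains (c + 2)) = true then
              if (decide (0 < PySem.List.count cards c) &&
                  decide (0 < PySem.List.count cards (c + 1)) &&
                  decide (0 < PySem.List.count cards (c + 2))) = true then
                dfsA fuel (pyRemove (pyRemove (pyRemove cards c) (c + 1)) (c + 2))
                  (path ++ [(c, c + 1, c + 2)])
              else none
            else none) u
          = Option.map (fun x => path ++ x) (List.findSome? (fun c =>
              if (decide (c + 1 ∈ u) && decide (c + 2 ∈ u)) = true then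
                Option.map (fun x => (c, c + 1, c + 2) :: x)
                  (G s.length (pyRemove (pyRemove (pyRemove s c) (c + 1)) (c + 2)))
              else none) u) := by
        rw [← findSome?_map_out]
        apply findSome?_congr
        intro c hcu
        by_cases hcnd : (u.contains (c + 1) && u.contains (c + 2)) = true
        · have hcnd0 := hcnd
          rw [Bool.and_eq_true, List.contains_iff_mem, List.contains_iff_mem] at hcnd
          have hgcond : (decide (c + 1 ∈ u) && decide (c + 2 ∈ u)) = true := by
            rw [Bool.and_eq_true, decide_eq_true_iff, decide_eq_true_iff]; exact hcnd
          have hcm : c ∈ cards := hmemu c hcu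
          have h1m : c + 1 ∈ cards := hmemu _ hcnd.1
          have h2m : c + 2 ∈ cards := hmemu _ hcnd.2
          have hcs : c ∈ s := by rw [hs, PySem.List.mem_sorted]; exact hcm
          have h1s : c + 1 ∈ s := by rw [hs, PySem.List.mem_sorted]; exact h1m
          have h2s : c + 2 ∈ s := by rw [hs, PySem.List.mem_sorted]; exact h2m
          have hin : (decide (0 < PySem.List.count cards c) &&
              decide (0 < PySem.List.count cards (c + 1)) &&
              decide (0 < PySem.List.count cards (c + 2))) = true := by
            simp [PySem.List.count_eq, List.count_pos_iff, hcm, h1m, h2m]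
          rw [if_pos hcnd0, if_pos hin, if_pos hgcond]
          obtain ⟨m2, m3⟩ := seq_mems h1m h2m
          obtain ⟨n2, n3⟩ := seq_mems h1s h2s
          have hL := erase3_length hcm m2 m3
          have hLs := erase3_length hcs n2 n3
          rw [pyRemove3_eq hcm m2 m3, pyRemove3_eq hcs n2 n3]
          rw [ih _ (path ++ [(c, c + 1, c + 2)]) (by omega)]
          rw [sorted_erase3 cards c (c + 1) (c + 2), ← hs]
          rw [G_stable (show (((s.erase c).erase (c + 1)).erase (c + 2)).length < s.length by omega)]
          cases Gc (((s.erase c).erase (c + 1)).erase (c + 2)) <;> simp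
        · rw [if_neg hcnd, if_neg (by
            rw [Bool.and_eq_true, List.contains_iff_mem, List.contains_iff_mem] at hcnd
            rw [Bool.and_eq_true, decide_eq_true_iff, decide_eq_true_iff]
            exact hcnd)]
          simp
      rw [htrip]
      cases hT : List.findSome? (fun c =>
          if 3 ≤ PySem.List.count s c then
            Option.map (fun x => (c, c, c) :: x) (G s.length (pyRemove (pyRemove (pyRemove s c) c) c))
          else none) u with
      | some r => simp
      | none =>
        simp only [Option.map_none]
        rw [hstep, hseq]
        cases hT2 : List.findSome? (fun c =>
            if (decide (c + 1 ∈ u) && decide (c + 2 ∈ u)) = true then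
              Option.map (fun x => (c, c + 1, c + 2) :: x)
                (G s.length (pyRemove (pyRemove (pyRemove s c) (c + 1)) (c + 2)))
            else none) u with
        | some r => simp
        | none => simp


-- ===== VERDICT (by name: the statement is the Claim_ definition above) =====
theorem dfs_melds_spec : Claim_equal_dfs_melds := by
  intro cards path _
  unfold Spec_dfs_melds dfs_melds dfs_melds_alt
  have hB := (solveB_ok (cards.length + 1) (PySem.List.sorted cards (fun x => x) false)
      PySem.Dict.empty (by rw [PySem.List.length_sorted]; omega)
      (by intro k v h; simp [pysem] at h)).1
  rw [dfsA_eq_G (cards.length + 1) cards path (by omega), hB]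
  cases Gc (PySem.List.sorted cards (fun x => x) false) <;> simp
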